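-- pv_equiv track=rewrite | github.com/Banking-Reliever/banking | tools/render_drawio.py | group_by_zone
-- ===== SOURCE A (Python) =====
-- from collections import defaultdict
--
-- def group_by_zone(caps: list[dict]) -> dict[str, list[dict]]:
--     groups: dict[str, list[dict]] = defaultdict(list)
--     for c in caps:
--         zone = c.get("zoning", "UNKNOWN")
--         groups[zone].append(c)
--     # Tri par id dans chaque zone
--     for zone in groups:
--         groups[zone].sort(key=lambda c: c["id"])
--     return groups
-- ===== SOURCE B (Python) =====
-- from collections import defaultdict
--
-- def group_by_zone(caps: list[dict]) -> dict[str, list[dict]]: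
--     # One global stable sort by id, then one filtering comprehension per
--     # first-seen zone; no per-group sort, no append loop.
--     groups: dict[str, list[dict]] = defaultdict(list)
--     ordered = sorted(caps, key=lambda c: c["id"])
--     for z in dict.fromkeys(c.get("zoning", "UNKNOWN") for c in caps):
--         groups[z] = [c for c in ordered if c.get("zoning", "UNKNOWN") == z]
--     return groups
-- ===== Notes on version B (the rewrite author's own statement) =====
-- stated objective: alternative
-- what changed: Instead of appending each cap into its zone's list and then sorting every group, B sorts the whole list by id once, computes the distinct zones in first-appearance order, and builds each group as a filter of the globally sorted list; stability makes each group sorted by id without any per-group sort.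
import Mathlib
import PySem

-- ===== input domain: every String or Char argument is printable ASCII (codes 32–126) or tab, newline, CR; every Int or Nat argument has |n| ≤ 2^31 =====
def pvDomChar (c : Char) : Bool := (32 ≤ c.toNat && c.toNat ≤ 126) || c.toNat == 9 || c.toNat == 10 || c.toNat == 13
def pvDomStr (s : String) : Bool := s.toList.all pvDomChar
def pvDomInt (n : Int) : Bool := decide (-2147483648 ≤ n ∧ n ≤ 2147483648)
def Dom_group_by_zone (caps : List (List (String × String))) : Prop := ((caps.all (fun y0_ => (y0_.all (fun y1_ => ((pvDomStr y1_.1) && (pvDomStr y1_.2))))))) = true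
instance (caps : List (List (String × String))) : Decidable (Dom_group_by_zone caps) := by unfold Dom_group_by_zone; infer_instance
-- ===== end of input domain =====

-- B replaces A's append-then-sort-each-group by one global stable sort by id
-- followed by one filter per first-seen zone; alternative decomposition, same
-- asymptotic sort cost. Equivalence is about the return value.

-- ===== PORT A =====
-- c.get(k, dflt) on a dict represented as an association list (first match).
def pyDictGetD (c : List (String × String)) (k dflt : String) : String :=
  ((c.find? (fun kv => kv.1 == k)).map (fun kv => kv.2)).getD dflt

def zoneOf (c : List (String × String)) : String := pyDictGetD c "zoning" "UNKNOWN"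

-- c["id"]: total with default "" — Pre_ guarantees "id" is present, so the default is never used.
def idOf (c : List (String × String)) : String := pyDictGetD c "id" ""

def group_by_zone (caps : List (List (String × String))) : List (String × List (List (String × String))) :=
  let groups : PySem.Dict String (List (List (String × String))) :=
    caps.foldl (fun d c => d.modify (zoneOf c) [] (fun l => l ++ [c])) PySem.Dict.empty
  -- for zone in groups: groups[zone].sort(key=lambda c: c["id"])
  groups.items.map (fun p => (p.1, PySem.List.sorted p.2 idOf false))

-- ===== PORT B =====
def group_by_zone_alt (caps : List (List (String × String))) : List (String × List (List (String × String))) :=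
  let ordered := PySem.List.sorted caps idOf false
  -- dict.fromkeys(...): the distinct zones, in first-appearance order
  let zones := PySem.Set.ofList (caps.map zoneOf)
  zones.map (fun z => (z, ordered.filter (fun c => zoneOf c == z)))

-- ===== PRECONDITION & SPEC =====
-- Pre_ excludes exactly the inputs where the Python A raises KeyError: some cap has no "id" key
-- (the sort key lookup c["id"] fails); B's Python raises there too.
def Pre_group_by_zone (caps : List (List (String × String))) : Prop :=
  (caps.all (fun c => c.any (fun kv => kv.1 == "id"))) = true
instance (caps : List (List (String × String))) : Decidable (Pre_group_by_zone caps) := by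
  unfold Pre_group_by_zone; infer_instance

def pvWitness_group_by_zone : (List (List (String × String))) :=
  [[("id", "2"), ("zoning", "Z1")], [("id", "1"), ("zoning", "Z1")], [("id", "3")]]

def Spec_group_by_zone (caps : List (List (String × String))) (out : List (String × List (List (String × String)))) : Prop := out = group_by_zone_alt caps
instance (caps : List (List (String × String))) (out : List (String × List (List (String × String)))) : Decidable (Spec_group_by_zone caps out) := by unfold Spec_group_by_zone; infer_instance

-- ===== CLAIM (what is proved, stated in full; the proofs are below) =====
def Claim_equal_group_by_zone : Prop := ∀ (caps : List (List (String × String))), Dom_group_by_zone caps → Pre_group_by_zone caps → Spec_group_by_zone caps (group_by_zone caps)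

-- ===== LEMMAS AND PROOFS =====

-- Stability of Python's sort under filtering ------------------------------------

theorem insertBy_all_lt {α : Type} (key : α → String) (x : α) (l : List α)
    (h : ∀ z ∈ l, key x < key z) :
    PySem.List.insertBy (fun a b => decide (key a < key b)) x l = x :: l := by
  cases l with
  | nil => simp [PySem.List.insertBy]
  | cons y t => simp [PySem.List.insertBy, h y (List.mem_cons_self ..)]

theorem pairwise_insertBy {α : Type} (key : α → String) (x : α) (l : List α)
    (h : l.Pairwise (fun a b => key a ≤ key b)) :
    (PySem.List.insertBy (fun a b => decide (key a < key b)) x l).Pairwise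
      (fun a b => key a ≤ key b) := by
  induction l with
  | nil => simp [PySem.List.insertBy]
  | cons y t ih =>
    rcases List.pairwise_cons.mp h with ⟨hy, ht⟩
    by_cases hlt : key x < key y
    · simp only [PySem.List.insertBy, hlt, decide_true, if_true]
      refine List.pairwise_cons.mpr ⟨?_, h⟩
      intro z hz
      rcases List.mem_cons.mp hz with rfl | hz
      · exact le_of_lt hlt
      · exact le_trans (le_of_lt hlt) (hy z hz)
    · simp only [PySem.List.insertBy, hlt, decide_false, Bool.false_eq_true, if_false]
      refine List.pairwise_cons.mpr ⟨?_, ih ht⟩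
      intro z hz
      rcases (PySem.List.mem_insertBy _ x z t).mp hz with rfl | hz
      · exact le_of_not_gt hlt
      · exact hy z hz

theorem filter_insertBy {α : Type} (key : α → String) (p : α → Bool) (x : α) (l : List α)
    (hs : l.Pairwise (fun a b => key a ≤ key b)) :
    (PySem.List.insertBy (fun a b => decide (key a < key b)) x l).filter p =
      if p x then PySem.List.insertBy (fun a b => decide (key a < key b)) x (l.filter p)
      else l.filter p := by
  induction l with
  | nil =>
    by_cases hp : p x <;> simp [PySem.List.insertBy, List.filter, hp]
  | cons y t ih =>
    rcases List.pairwise_cons.mp hs with ⟨hy, ht⟩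
    by_cases hlt : key x < key y
    · simp only [PySem.List.insertBy, hlt, decide_true, if_true]
      by_cases hp : p x
      · by_cases hpy : p y
        · have hins := insertBy_all_lt key x (y :: t.filter p)
            (by intro z hz
                rcases List.mem_cons.mp hz with rfl | hz
                · exact hlt
                · exact lt_of_lt_of_le hlt (hy z (List.mem_of_mem_filter hz)))
          simp only [List.filter_cons, hp, hpy, hins, if_true]
        · have hins := insertBy_all_lt key x (t.filter p)
            (by intro z hz
                exact lt_of_lt_of_le hlt (hy z (List.mem_of_mem_filter hz)))
          simp only [List.filter_cons, hp, hpy, hins, if_true, Bool.false_eq_true, if_false]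
      · simp only [List.filter_cons, hp, Bool.false_eq_true, if_false]
    · simp only [PySem.List.insertBy, hlt, decide_false, Bool.false_eq_true, if_false]
      by_cases hp : p x
      · by_cases hpy : p y
        · simp only [List.filter_cons, hpy, if_true, ih ht, hp]
          simp only [PySem.List.insertBy, hlt, decide_false, Bool.false_eq_true, if_false]
        · simp only [List.filter_cons, hpy, ih ht, hp, if_true, Bool.false_eq_true, if_false]
      · simp only [List.filter_cons, ih ht, hp, Bool.false_eq_true, if_false]

theorem filter_foldl_insertBy {α : Type} (key : α → String) (p : α → Bool) :
    ∀ (xs : List α) (acc : List α), acc.Pairwise (fun a b => key a ≤ key b) →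
    (xs.foldl (fun a x => PySem.List.insertBy (fun a b => decide (key a < key b)) x a) acc).filter p =
      (xs.filter p).foldl (fun a x => PySem.List.insertBy (fun a b => decide (key a < key b)) x a)
        (acc.filter p) := by
  intro xs
  induction xs with
  | nil => intro acc _; simp
  | cons x t ih =>
    intro acc hacc
    have h1 := ih (PySem.List.insertBy (fun a b => decide (key a < key b)) x acc)
      (pairwise_insertBy key x acc hacc)
    rw [List.foldl_cons, h1, filter_insertBy key p x acc hacc]
    by_cases hp : p x
    · simp only [List.filter_cons, List.foldl_cons, hp, if_true]
    · simp only [List.filter_cons, hp, Bool.false_eq_true, if_false]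

theorem filter_sorted {α : Type} (key : α → String) (p : α → Bool) (xs : List α) :
    (PySem.List.sorted xs key false).filter p = PySem.List.sorted (xs.filter p) key false := by
  rw [PySem.List.sorted_eq_foldl_insertBy, PySem.List.sorted_eq_foldl_insertBy]
  simpa using filter_foldl_insertBy key p xs [] List.Pairwise.nil

-- A's grouping dictionary, characterised ----------------------------------------

theorem filter_map_pair {α β : Type} (g : α → β) (caps : List α) (z : β) [DecidableEq β] :
    ((caps.map (fun c => (g c, c))).filter (fun q => q.1 == z)).map (fun q => q.2) =
      caps.filter (fun c => g c == z) := by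
  induction caps with
  | nil => rfl
  | cons c t ih =>
    by_cases h : g c == z <;> simp [List.filter, h, ih]

theorem groupsA_getD (caps : List (List (String × String))) (z : String) :
    (caps.foldl (fun d c => d.modify (zoneOf c) [] (fun l => l ++ [c])) PySem.Dict.empty).getD z []
      = caps.filter (fun c => zoneOf c == z) := by
  have hmap : caps.foldl (fun d c => d.modify (zoneOf c) [] (fun l => l ++ [c])) PySem.Dict.empty
      = (caps.map (fun c => (zoneOf c, c))).foldl
          (fun d q => d.modify q.1 [] (fun l => l ++ [q.2])) PySem.Dict.empty := by
    rw [List.foldl_map]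
  rw [hmap, PySem.Dict.getD_foldl_modify_append, PySem.Dict.getD_empty, List.nil_append,
    filter_map_pair]

theorem groupsA_keys (caps : List (List (String × String))) :
    (caps.foldl (fun d c => d.modify (zoneOf c) [] (fun l => l ++ [c])) PySem.Dict.empty).keys
      = PySem.Set.ofList (caps.map zoneOf) := by
  have := PySem.Dict.keys_foldl_modify_key caps zoneOf ([] : List (List (String × String)))
    (fun _ c l => l ++ [c]) PySem.Dict.empty
  simpa [PySem.Set.update_nil_left] using this

-- main equality
theorem ports_agree (caps : List (List (String × String))) :
    group_by_zone caps = group_by_zone_alt caps := by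
  have hnodupA : (caps.foldl (fun d c => d.modify (zoneOf c) [] (fun l => l ++ [c]))
      PySem.Dict.empty).keys.Nodup := by
    rw [groupsA_keys]; exact PySem.Set.nodup_ofList _
  simp only [group_by_zone, group_by_zone_alt]
  rw [PySem.Dict.items_eq_map_keys _ hnodupA [], groupsA_keys, List.map_map]
  apply List.map_congr_left
  intro z _
  simp only [Function.comp_apply, groupsA_getD]
  exact Prod.ext rfl (filter_sorted idOf (fun c => zoneOf c == z) caps).symm

-- ===== VERDICT (by name: the statement is the Claim_ definition above) =====
theorem group_by_zone_spec : Claim_equal_group_by_zone := by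
  intro caps _ _
  unfold Spec_group_by_zone
  exact ports_agree caps
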